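-- pv_equiv track=rewrite | github.com/jk45054/CTF-writeups | Flare-On 11/10_Catbert_Ransomware/code/disasm.py | transform_number_to_printable_string
-- ===== SOURCE A (Python) =====
-- def transform_number_to_printable_string(value):
--     ascii = ""
--     tmp_stack_value = value
--     while tmp_stack_value > 0:
--         cur_byte = tmp_stack_value & 0xff
--         if cur_byte >= 0x20 and cur_byte <= 0x7e:
--             ascii += chr(cur_byte)
--         else:
--             ascii += "."
--         tmp_stack_value = tmp_stack_value >> 8
--     return ascii[::-1]  # reverse the string as we processed from lowest byte to highest
-- ===== SOURCE B (Python) =====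
-- def transform_number_to_printable_string(value):
--     if value <= 0:
--         return ""
--     b = value.to_bytes((value.bit_length() + 7) // 8, 'big')
--     return ''.join(chr(x) if 0x20 <= x <= 0x7e else '.' for x in b)
-- ===== Notes on version B (the rewrite author's own statement) =====
-- stated objective: idiomatic
-- what changed: B replaces A's low-to-high bit-shifting while-loop plus final string reversal with a single big-endian to_bytes conversion and one join over the bytes in display order.
import Mathlib
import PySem

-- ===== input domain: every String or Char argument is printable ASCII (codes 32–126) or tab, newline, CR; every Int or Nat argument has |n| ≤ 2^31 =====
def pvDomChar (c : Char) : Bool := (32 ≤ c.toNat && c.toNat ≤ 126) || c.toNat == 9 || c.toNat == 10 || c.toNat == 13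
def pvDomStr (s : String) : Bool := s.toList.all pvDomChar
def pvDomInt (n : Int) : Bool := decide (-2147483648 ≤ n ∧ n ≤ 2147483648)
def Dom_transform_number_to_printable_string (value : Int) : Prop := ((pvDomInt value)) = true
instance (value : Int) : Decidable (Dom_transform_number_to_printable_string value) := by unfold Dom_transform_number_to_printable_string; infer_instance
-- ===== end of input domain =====

-- B replaces A's low-to-high bit-shifting loop + final reversal by one big-endian
-- byte conversion iterated in display order (idiomatic; return value only).

-- ===== PORT A =====
-- the while loop: accumulate chars low byte first (acc grows by += as in A)
def pvLoopA (v : Int) (acc : List Char) : List Char :=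
  if h : 0 < v then
    let cur : Int := Int.land v 255
    let acc' := acc ++ [if 32 ≤ cur ∧ cur ≤ 126 then Char.ofNat cur.toNat else '.']
    pvLoopA (v >>> (8 : Nat)) acc'
  else acc
termination_by v.toNat
decreasing_by
  cases v with
  | ofNat n =>
    show (Int.ofNat (n >>> 8)).toNat < (Int.ofNat n).toNat
    show n >>> 8 < n
    rw [Nat.shiftRight_eq_div_pow]
    exact Nat.div_lt_self (by exact_mod_cast (show (0:Int) < (n:Int) from h)) (by norm_num)
  | negSucc n => exact absurd h (by exact of_decide_eq_false rfl)

def transform_number_to_printable_string (value : Int) : String :=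
  -- ascii[::-1] is the reversal of the accumulated string
  String.mk ((pvLoopA value []).reverse)

-- ===== PORT B =====
-- value.to_bytes(nb, 'big'): nb bytes, big-endian (most significant first)
def pvToBytesBE : Nat → Nat → List Nat
  | 0, _ => []
  | k+1, v => pvToBytesBE k (v / 256) ++ [v % 256]

-- chr(x) if 0x20 <= x <= 0x7e else '.'
def pvCharB (x : Nat) : Char := if 32 ≤ x ∧ x ≤ 126 then Char.ofNat x else '.'

def transform_number_to_printable_string_alt (value : Int) : String :=
  if value ≤ 0 then ""
  else
    let v := value.toNat
    let nb := (Nat.log2 v + 1 + 7) / 8   -- (value.bit_length() + 7) // 8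
    String.mk ((pvToBytesBE nb v).map pvCharB)

-- ===== PRECONDITION & SPEC =====
def Spec_transform_number_to_printable_string (value : Int) (out : String) : Prop := out = transform_number_to_printable_string_alt value
instance (value : Int) (out : String) : Decidable (Spec_transform_number_to_printable_string value out) := by unfold Spec_transform_number_to_printable_string; infer_instance

-- ===== CLAIM (what is proved, stated in full; the proofs are below) =====
def Claim_equal_transform_number_to_printable_string : Prop := ∀ (value : Int), Dom_transform_number_to_printable_string value → Spec_transform_number_to_printable_string value (transform_number_to_printable_string value)

-- ===== LEMMAS AND PROOFS =====

-- the little-endian byte list of n (low byte first)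
def pvBytesLE (n : Nat) : List Nat :=
  if h : n = 0 then [] else n % 256 :: pvBytesLE (n / 256)
decreasing_by exact Nat.div_lt_self (Nat.pos_of_ne_zero h) (by norm_num)

theorem pvLoopA_eq (n : Nat) (acc : List Char) :
    pvLoopA (n : Int) acc = acc ++ (pvBytesLE n).map pvCharB := by
  induction n using Nat.strong_induction_on generalizing acc with
  | _ n ih =>
    rw [pvLoopA, pvBytesLE]
    by_cases h0 : n = 0
    · simp [h0]
    · have hpos : 0 < (n : Int) := by exact_mod_cast Nat.pos_of_ne_zero h0
      rw [dif_pos hpos, dif_neg h0]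
      have hland : Int.land (n : Int) 255 = ((n % 256 : Nat) : Int) := by
        show Int.ofNat (n &&& 255) = Int.ofNat (n % 256)
        rw [Nat.and_two_pow_sub_one_eq_mod n 8]
      have hshift : ((n : Int)) >>> (8 : Nat) = ((n / 256 : Nat) : Int) := by
        show Int.ofNat (n >>> 8) = Int.ofNat (n / 256)
        rw [Nat.shiftRight_eq_div_pow]
      rw [hland, hshift, ih (n / 256) (Nat.div_lt_self (Nat.pos_of_ne_zero h0) (by norm_num))]
      have hchar : (if 32 ≤ ((n % 256 : Nat) : Int) ∧ ((n % 256 : Nat) : Int) ≤ 126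
            then Char.ofNat ((n % 256 : Nat) : Int).toNat else '.') = pvCharB (n % 256) := by
        unfold pvCharB
        by_cases hc : 32 ≤ n % 256 ∧ n % 256 ≤ 126
        · rw [if_pos (by exact_mod_cast hc), if_pos hc]
          rfl
        · rw [if_neg (by exact_mod_cast hc), if_neg hc]
      rw [hchar]
      simp

theorem pvToBytesBE_eq (k : Nat) : ∀ n : Nat, k = (pvBytesLE n).length →
    pvToBytesBE k n = (pvBytesLE n).reverse := by
  induction k with
  | zero =>
    intro n h
    have : pvBytesLE n = [] := List.eq_nil_of_length_eq_zero h.symm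
    rw [pvToBytesBE, this, List.reverse_nil]
  | succ k ih =>
    intro n h
    have h0 : n ≠ 0 := by
      intro hn; rw [hn, pvBytesLE] at h; simp at h
    rw [pvBytesLE, dif_neg h0] at h ⊢
    simp only [List.length_cons, Nat.succ.injEq] at h
    rw [pvToBytesBE, ih (n / 256) h, List.reverse_cons]

theorem pvBytesLE_length (n : Nat) (h : 0 < n) :
    (pvBytesLE n).length = (Nat.log2 n + 1 + 7) / 8 := by
  induction n using Nat.strong_induction_on with
  | _ n ih =>
    rw [pvBytesLE, dif_neg (Nat.pos_iff_ne_zero.mp h)]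
    by_cases h256 : n < 256
    · have hz : n / 256 = 0 := Nat.div_eq_of_lt h256
      have hnil : pvBytesLE 0 = [] := by rw [pvBytesLE]; simp
      rw [hz, hnil]
      have hlog : Nat.log2 n < 8 := (Nat.log2_lt (Nat.pos_iff_ne_zero.mp h)).mpr h256
      simp only [List.length_cons, List.length_nil]
      omega
    · push_neg at h256
      have hdpos : 0 < n / 256 := Nat.div_pos h256 (by norm_num)
      have hlt : n / 256 < n := Nat.div_lt_self h (by norm_num)
      rw [List.length_cons, ih (n / 256) hlt hdpos]
      have hlogdiv : Nat.log2 (n / 256) = Nat.log2 n - 8 := by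
        simp only [Nat.log2_eq_log_two]
        have : (256 : Nat) = 2 ^ 8 := by norm_num
        rw [this, Nat.log_div_base_pow]
      have hlogge : 8 ≤ Nat.log2 n := by
        simp only [Nat.log2_eq_log_two]
        exact (Nat.pow_le_iff_le_log (by norm_num) (by omega)).mp (by norm_num [h256])
      rw [hlogdiv]
      omega

-- ===== VERDICT (by name: the statement is the Claim_ definition above) =====
theorem transform_number_to_printable_string_spec : Claim_equal_transform_number_to_printable_string := by
  intro value _
  unfold Spec_transform_number_to_printable_string transform_number_to_printable_string
    transform_number_to_printable_string_alt
  by_cases hle : value ≤ 0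
  · rw [if_pos hle, pvLoopA, dif_neg (by omega)]
    rfl
  · rw [if_neg hle]
    push_neg at hle
    obtain ⟨n, rfl⟩ : ∃ n : Nat, value = (n : Int) := ⟨value.toNat, (Int.toNat_of_nonneg (le_of_lt hle)).symm⟩
    have hn : 0 < n := by exact_mod_cast hle
    show String.mk (pvLoopA (n : Int) []).reverse =
      String.mk ((pvToBytesBE ((Nat.log2 ((n : Int)).toNat + 1 + 7) / 8) ((n : Int)).toNat).map pvCharB)
    have htn : ((n : Int)).toNat = n := Int.toNat_natCast n
    rw [pvLoopA_eq n [], htn,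
      pvToBytesBE_eq _ n (pvBytesLE_length n hn).symm,
      List.map_reverse]
    rfl
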